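-- pv_equiv track=rewrite | github.com/SeongBeomLEE/CodingTest | Programmers/Level3/Q19.py | solution
-- ===== SOURCE A (Python) =====
-- from collections import deque
--
-- def get_time(x):
--     h, m = x.split(':')
--     time = (int(h) * 60) + int(m)
--     return time
--
-- def solution(n, t, m, timetable):
--     timetable = deque(sorted(list(map(lambda x: get_time(x), timetable))))
--     start = get_time('09:00')
--     total_m = 0
--     for _ in range(n):
--         _m = 0
--         while True:
--             if abs(_m) == m:
--                 answer = ans - 1
--                 break
--             if not timetable:
--                 answer = start
--                 break
--             if timetable[0] <= start:
--                 ans = timetable.popleft()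
--                 _m -= 1
--             else:
--                 answer = start
--                 break
--         total_m += abs(_m)
--         start += t
--         if total_m >= (n * m): break
--
--     h = str(answer // 60)
--     m = str(answer % 60)
--     if len(h) == 1: h = '0' + h
--     if len(m) == 1: m = '0' + m
--     answer = f'{h}:{m}'
--     return answer
-- ===== SOURCE B (Python) =====
-- def _take(rem, bus, m):
--     # number of leading remaining passengers that board this bus (at most m, time <= bus)
--     c = 0
--     for x in rem:
--         if c >= m or x > bus:
--             break
--         c += 1
--     return c
--
-- def _two(v):
--     s = str(v)
--     return '0' + s if len(s) == 1 else s
--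
-- def solution(n, t, m, timetable):
--     rem = sorted(60 * int(h) + int(mm) for h, mm in (s.split(':') for s in timetable))
--     bus = 540
--     for _ in range(n - 1):
--         rem = rem[_take(rem, bus, m):]
--         bus += t
--     c = _take(rem, bus, m)
--     ans = rem[c - 1] - 1 if c == m else bus
--     return _two(ans // 60) + ':' + _two(ans % 60)
-- ===== Notes on version B (the rewrite author's own statement) =====
-- stated objective: simpler
-- what changed: Replaces A's stateful deque simulation (per-passenger popleft loop with the _m/ans/total_m bookkeeping, answer overwritten every bus, and the total_m>=n*m early break) by a pointerless suffix computation: a counting helper gives how many leading sorted times board each bus, the first n-1 buses just slice that prefix off, and only the n-th bus decides the answer with the 'full => last boarder - 1, else bus time' rule.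
-- outside the precondition, e.g. on solution(2, 10, -1, ['08:00']): A returns '09:00', B returns '09:10'
import Mathlib
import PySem

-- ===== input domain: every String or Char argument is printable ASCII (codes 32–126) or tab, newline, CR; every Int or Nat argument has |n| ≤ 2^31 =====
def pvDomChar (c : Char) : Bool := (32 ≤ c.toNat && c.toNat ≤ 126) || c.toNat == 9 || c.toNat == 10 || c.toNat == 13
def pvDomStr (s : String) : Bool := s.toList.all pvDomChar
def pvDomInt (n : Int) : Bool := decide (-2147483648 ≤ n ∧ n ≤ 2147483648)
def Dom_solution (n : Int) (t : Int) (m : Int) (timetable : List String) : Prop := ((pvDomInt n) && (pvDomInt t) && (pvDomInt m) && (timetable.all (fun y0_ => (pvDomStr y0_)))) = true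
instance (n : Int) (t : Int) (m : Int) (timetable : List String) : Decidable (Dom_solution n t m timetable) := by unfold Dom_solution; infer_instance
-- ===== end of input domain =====

-- B replaces A's stateful deque simulation (popleft loop with _m/ans/total_m bookkeeping and an early
-- break) by per-bus prefix counting and slicing of the sorted list; only the n-th bus decides the answer.
-- Objective: simpler. Equality of RETURN values is what is proved (A only rebinds its parameter, no
-- caller-visible mutation).

-- ===== PORT A =====
-- get_time(x); none exactly where Python raises (bad split shape / int()) — such inputs are outside Pre_
def getTimeA (x : String) : Option Int :=
  match PySem.Str.split? x ":" with
  | some [h, mm] =>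
    match PySem.Int.ofStr? h, PySem.Int.ofStr? mm with
    | some hv, some mv => some (hv * 60 + mv)
    | _, _ => none
  | _ => none

-- the inner 'while True' of A; state (queue, _m, ans); returns (answer, queue, _m, ans).
-- ans starts as 0 at top level standing for Python's unbound 'ans' — with m ≥ 1 (Pre_) it is never read before set.
def innerA (m start : Int) : List Int → Int → Int → Int × List Int × Int × Int
  | q, mm, ans =>
    if |mm| = m then (ans - 1, q, mm, ans)
    else
      match q with
      | [] => (start, [], mm, ans)
      | x :: rest =>
        if x ≤ start then innerA m start rest (mm - 1) x
        else (start, x :: rest, mm, ans)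

-- the 'for _ in range(n)' of A; fuel = remaining iterations; answer starts as 0 (unbound in Python; n ≥ 1 in Pre_)
def outerA (m t nm : Int) : Nat → List Int → Int → Int → Int → Int → Int
  | 0, _q, _start, _tot, _ans, answer => answer
  | f + 1, q, start, tot, ans, _answer =>
    let r := innerA m start q 0 ans
    let tot' := tot + |r.2.2.1|
    if tot' ≥ nm then r.1
    else outerA m t nm f r.2.1 (start + t) tot' r.2.2.2 r.1

def solution (n : Int) (t : Int) (m : Int) (timetable : List String) : String :=
  let tt := PySem.List.sorted (timetable.map (fun x => (getTimeA x).getD 0)) (fun v => v) false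
  let start := (getTimeA "09:00").getD 0
  let answer := outerA m t (n * m) n.toNat tt start 0 0 0
  let h := PySem.Int.toStr (PySem.Int.floordiv answer 60)
  let mm := PySem.Int.toStr (PySem.Int.mod answer 60)
  let h := if PySem.Str.len h = 1 then "0" ++ h else h
  let mm := if PySem.Str.len mm = 1 then "0" ++ mm else mm
  h ++ ":" ++ mm

-- ===== PORT B =====
-- B's minute parse (60*h + mm); none exactly where Python raises — outside Pre_
def minutesB (s : String) : Option Int :=
  match PySem.Str.split? s ":" with
  | some [h, mm] =>
    match PySem.Int.ofStr? h, PySem.Int.ofStr? mm with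
    | some hv, some mv => some (60 * hv + mv)
    | _, _ => none
  | _ => none

-- _take(rem, bus, m): how many leading elements board (for-loop with break)
def takeCount (m bus : Int) : List Int → Int → Int
  | [], c => c
  | x :: rest, c => if c ≥ m ∨ bus < x then c else takeCount m bus rest (c + 1)

-- _two(v)
def twoB (v : Int) : String :=
  let s := PySem.Int.toStr v
  if PySem.Str.len s = 1 then "0" ++ s else s

-- the 'for _ in range(n - 1)' of B; state (rem, bus)
def dropLoopB (m t : Int) : Nat → List Int → Int → List Int × Int
  | 0, rem, bus => (rem, bus)
  | f + 1, rem, bus =>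
      dropLoopB m t f (PySem.List.slice rem (some (takeCount m bus rem 0)) none) (bus + t)

def solution_alt (n : Int) (t : Int) (m : Int) (timetable : List String) : String :=
  let rem0 := PySem.List.sorted (timetable.map (fun s => (minutesB s).getD 0)) (fun v => v) false
  let p := dropLoopB m t (n - 1).toNat rem0 540
  let c := takeCount m p.2 p.1 0
  let ans := if c = m then (PySem.List.pyGet? p.1 (c - 1)).getD 0 - 1 else p.2
  twoB (PySem.Int.floordiv ans 60) ++ ":" ++ twoB (PySem.Int.mod ans 60)

-- ===== PRECONDITION & SPEC =====
def parseOK (s : String) : Bool :=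
  match PySem.Str.split? s ":" with
  | some [h, mm] => (PySem.Int.ofStr? h).isSome && (PySem.Int.ofStr? mm).isSome
  | _ => false

-- Pre_ is the task's natural domain: n ≥ 1 buses, capacity m ≥ 1, entries of the form 'int:int'.
-- A raises NameError for n ≤ 0 or m = 0 (unbound 'answer'/'ans') and ValueError on unparseable entries;
-- m < 0 (a negative capacity) is excluded although A still returns there: its total_m >= n*m early break
-- then fires after the first bus by accident and A answers '09:00' regardless of n and t.
def Pre_solution (n : Int) (t : Int) (m : Int) (timetable : List String) : Prop :=
  1 ≤ n ∧ 1 ≤ m ∧ ∀ s ∈ timetable, parseOK s = true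
instance (n : Int) (t : Int) (m : Int) (timetable : List String) : Decidable (Pre_solution n t m timetable) := by
  unfold Pre_solution; infer_instance

def pvWitness_solution : Int × Int × Int × List String := (2, 10, 2, ["08:00", "09:10", "08:03"])

def Spec_solution (n : Int) (t : Int) (m : Int) (timetable : List String) (out : String) : Prop := out = solution_alt n t m timetable
instance (n : Int) (t : Int) (m : Int) (timetable : List String) (out : String) : Decidable (Spec_solution n t m timetable out) := by unfold Spec_solution; infer_instance

-- ===== CLAIM (what is proved, stated in full; the proofs are below) =====
def Claim_equal_solution : Prop := ∀ (n : Int) (t : Int) (m : Int) (timetable : List String), Dom_solution n t m timetable → Pre_solution n t m timetable → Spec_solution n t m timetable (solution n t m timetable)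

-- ===== LEMMAS AND PROOFS =====

-- the two parses agree where both succeed
theorem getTimeA_eq_minutesB (s : String) (h : parseOK s = true) : getTimeA s = minutesB s := by
  unfold parseOK at h
  unfold getTimeA minutesB
  rcases hs : PySem.Str.split? s ":" with _ | l
  · rw [hs] at h
  · rw [hs] at h
    match l with
    | [] => simp at h
    | [_] => simp at h
    | a :: b :: c :: r => simp at h
    | [a, b] =>
      dsimp only at h ⊢
      rcases ha : PySem.Int.ofStr? a with _ | hv <;> rw [ha] at h <;>
        rcases hb : PySem.Int.ofStr? b with _ | mv <;> rw [hb] at h <;> simp at h ⊢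
      ring

theorem takeCount_ge (m bus : Int) : ∀ (q : List Int) (c : Int), c ≤ takeCount m bus q c := by
  intro q
  induction q with
  | nil => intro c; simp [takeCount]
  | cons x rest ih =>
    intro c
    simp only [takeCount]
    split
    · exact le_refl c
    · exact le_trans (by omega) (ih (c + 1))

theorem takeCount_le (m bus : Int) : ∀ (q : List Int) (c : Int), c ≤ m → takeCount m bus q c ≤ m := by
  intro q
  induction q with
  | nil => intro c hc; simpa [takeCount]
  | cons x rest ih =>
    intro c hc
    simp only [takeCount]
    split
    · exact hc
    · rename_i hcond
      rcases lt_or_ge c m with hlt | hge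
      · exact ih (c + 1) (by omega)
      · omega

-- the inner loop computes: board tk - c more passengers, answer 'full ⇒ last - 1, else start'
theorem innerA_eq (m bus : Int) :
    ∀ (q : List Int) (c : Nat) (ans : Int), (c : Int) ≤ m →
      innerA m bus q (-(c : Int)) ans =
        (let tk := takeCount m bus q (c : Int)
         let na := if (c : Int) < tk then q.getD ((tk - (c : Int)).toNat - 1) 0 else ans
         (if tk = m then na - 1 else bus, q.drop ((tk - (c : Int)).toNat), -tk, na)) := by
  intro q
  induction q with
  | nil =>
    intro c ans hc
    by_cases hcm : (c : Int) = m
    · have habs : |(-(c : Int))| = m := by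
        rw [abs_neg, abs_of_nonneg (Int.natCast_nonneg c)]; exact hcm
      simp [innerA, takeCount, hcm]
      intro hneg; exfalso; omega
    · have habs : ¬ (|(-(c : Int))| = m) := by
        rw [abs_neg, abs_of_nonneg (Int.natCast_nonneg c)]; exact hcm
      simp [innerA, takeCount, hcm]
  | cons x rest ih =>
    intro c ans hc
    by_cases hcm : (c : Int) = m
    · have habs : |(-(c : Int))| = m := by
        rw [abs_neg, abs_of_nonneg (Int.natCast_nonneg c)]; exact hcm
      have h1 : ((c : Int) ≥ m ∨ bus < x) := Or.inl (le_of_eq hcm.symm)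
      simp [innerA, takeCount, hcm]
      intro hneg; exfalso; omega
    · have habs : ¬ (|(-(c : Int))| = m) := by
        rw [abs_neg, abs_of_nonneg (Int.natCast_nonneg c)]; exact hcm
      have hclt : (c : Int) < m := lt_of_le_of_ne hc hcm
      by_cases hx : x ≤ bus
      · have hcond : ¬ ((c : Int) ≥ m ∨ bus < x) := by omega
        have hrec : innerA m bus (x :: rest) (-(c : Int)) ans
            = innerA m bus rest (-(c : Int) - 1) x := by
          rw [innerA]
          rw [if_neg habs, if_pos hx]
        have hcast : (-(c : Int) - 1) = -(((c + 1 : Nat)) : Int) := by push_cast; ring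
        rw [hrec, hcast, ih (c + 1) x (by push_cast; omega)]
        have htk : takeCount m bus (x :: rest) (c : Int) = takeCount m bus rest ((c : Int) + 1) := by
          rw [takeCount, if_neg hcond]
        have hge : (c : Int) + 1 ≤ takeCount m bus rest ((c : Int) + 1) := takeCount_ge m bus rest _
        set tk := takeCount m bus rest ((c : Int) + 1) with htkdef
        have hcast2 : (((c + 1 : Nat)) : Int) = (c : Int) + 1 := by push_cast; ring
        rw [hcast2]
        have hd : ((tk - (c : Int)).toNat) = ((tk - ((c : Int) + 1)).toNat) + 1 := by omega
        have hdrop : (x :: rest).drop ((tk - (c : Int)).toNat)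
            = rest.drop ((tk - ((c : Int) + 1)).toNat) := by rw [hd]; rfl
        have hclt2 : (c : Int) < tk := by omega
        by_cases hlt : (c : Int) + 1 < tk
        · have hidx : ((tk - (c : Int)).toNat - 1) = (((tk - ((c : Int) + 1)).toNat - 1)) + 1 := by
            omega
          have hgN : (x :: rest).getD ((tk - (c : Int)).toNat - 1) 0
              = rest.getD ((tk - ((c : Int) + 1)).toNat - 1) 0 := by
            rw [hidx]; simp [List.getD]
          simp only [← htkdef, htk, hdrop, hgN, if_pos hclt2, if_pos hlt]
        · have htk1 : tk = (c : Int) + 1 := by omega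
          have hz : ((tk - (c : Int)).toNat - 1) = 0 := by omega
          have hgN : (x :: rest).getD ((tk - (c : Int)).toNat - 1) 0 = x := by
            rw [hz]; simp [List.getD]
          simp only [← htkdef, htk, hdrop, hgN, if_pos hclt2, if_neg hlt]
      · have hcond : ((c : Int) ≥ m ∨ bus < x) := Or.inr (by omega)
        have htk : takeCount m bus (x :: rest) (c : Int) = (c : Int) := by
          rw [takeCount, if_pos hcond]
        rw [innerA]
        rw [if_neg habs]
        rw [if_neg hx]
        simp [htk, hcm]

-- the outer loop: the first f-1 buses only drop boarded prefixes; the last bus decides the answer;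
-- the early break never fires before the last bus (tot stays ≤ (iterations done)·m < nm)
theorem outerA_eq (m t nm : Int) (hm : 1 ≤ m) :
    ∀ (f : Nat) (q : List Int) (bus tot ans a0 : Int), 1 ≤ f →
      tot + (f : Int) * m ≤ nm →
      outerA m t nm f q bus tot ans a0 =
        (let p := dropLoopB m t (f - 1) q bus
         let c := takeCount m p.2 p.1 0
         if c = m then (PySem.List.pyGet? p.1 (c - 1)).getD 0 - 1 else p.2) := by
  intro f
  induction f with
  | zero => intro q bus tot ans a0 hf; omega
  | succ f ih =>
    intro q bus tot ans a0 _ htot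
    have hinner := innerA_eq m bus q 0 ans (by omega)
    simp only [Nat.cast_zero, neg_zero] at hinner
    have htk0 : (0 : Int) ≤ takeCount m bus q 0 := takeCount_ge m bus q 0
    have htkm : takeCount m bus q 0 ≤ m := takeCount_le m bus q 0 (by omega)
    set tk := takeCount m bus q 0 with htkdef
    have habs : |(-tk)| = tk := by rw [abs_neg]; exact abs_of_nonneg htk0
    match f with
    | 0 =>
      -- last bus: the answer is returned whether or not the break fires
      simp only [outerA, hinner]
      have hdl0 : dropLoopB m t (1 - 1) q bus = (q, bus) := rfl
      simp only [hdl0]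
      by_cases hfull : tk = m
      · have hltm : (0 : Int) < m := by omega
        have hidx : PySem.List.pyGet? q (m - 1) = q[(m - 1).toNat]? :=
          PySem.List.pyGet?_of_nonneg q (by omega)
        have hnat : (m - 1).toNat = m.toNat - 1 := by omega
        simp only [hfull, if_true, ← htkdef]
        split <;>
          · simp only [hidx, hnat, sub_zero, List.getD_eq_getElem?_getD]
      · simp only [← htkdef]
        split <;> simp
    | f' + 1 =>
      have hF : (0 : Int) ≤ (f' : Int) := by positivity
      have hFm : 0 ≤ (f' : Int) * m := mul_nonneg hF (by omega)
      have htot' : tot + ((f' : Int) + 1 + 1) * m ≤ nm := by push_cast at htot; linarith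
      have hnb : ¬ (tot + tk ≥ nm) := by nlinarith
      have hstep : outerA m t nm (f' + 1 + 1) q bus tot ans a0 =
          (if tot + |(innerA m bus q 0 ans).2.2.1| ≥ nm then (innerA m bus q 0 ans).1
           else outerA m t nm (f' + 1) (innerA m bus q 0 ans).2.1 (bus + t)
             (tot + |(innerA m bus q 0 ans).2.2.1|) (innerA m bus q 0 ans).2.2.2
             (innerA m bus q 0 ans).1) := rfl
      rw [hstep, hinner]
      simp only [habs]
      rw [if_neg hnb]
      rw [ih _ (bus + t) _ _ _ (by omega) (by push_cast; linarith)]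
      have hslice : PySem.List.slice q (some tk) none = q.drop tk.toNat :=
        PySem.List.slice_from q htk0
      have hdl : dropLoopB m t (f' + 1 + 1 - 1) q bus
          = dropLoopB m t (f' + 1 - 1) (q.drop ((tk - 0).toNat)) (bus + t) := by
        show dropLoopB m t (f' + 1) q bus = dropLoopB m t f' (q.drop ((tk - 0).toNat)) (bus + t)
        simp only [dropLoopB, ← htkdef, hslice, sub_zero]
      rw [hdl]

-- ===== VERDICT (by name: the statement is the Claim_ definition above) =====
theorem solution_spec : Claim_equal_solution := by
  intro n t m timetable _hdom hpre
  obtain ⟨hn, hm, hparse⟩ := hpre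
  show solution n t m timetable = solution_alt n t m timetable
  have hmap : timetable.map (fun x => (getTimeA x).getD 0)
      = timetable.map (fun s => (minutesB s).getD 0) := by
    apply List.map_congr_left
    intro s hs
    rw [getTimeA_eq_minutesB s (hparse s hs)]
  have hstart : (getTimeA "09:00").getD 0 = 540 := by decide
  have hfuel : 1 ≤ n.toNat := by omega
  have htot : (0 : Int) + (n.toNat : Int) * m ≤ n * m := by
    have hcast : (n.toNat : Int) = n := by omega
    rw [hcast]; omega
  have hsub : n.toNat - 1 = (n - 1).toNat := by omega
  have hcore := outerA_eq m t (n * m) hm n.toNat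
    (PySem.List.sorted (timetable.map (fun s => (minutesB s).getD 0)) (fun v => v) false)
    540 0 0 0 hfuel htot
  rw [hsub] at hcore
  simp only [solution, solution_alt, hmap, hstart, hcore, twoB]
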